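-- pv_equiv track=rewrite | github.com/no-pla/Coding-Test | 프로그래머스/lv1/12954. x만큼 간격이 있는 n개의 숫자/x만큼 간격이 있는 n개의 숫자.py | solution
-- ===== SOURCE A (Python) =====
-- def solution(x, n):
--     answer = []
--     if x == 0:
--         for x in range(x, n):
--             answer.append(0)
--     else:
--         for x in range(x, n * x + x, x):
--             answer.append(x)
--     return answer
-- ===== SOURCE B (Python) =====
-- def solution(x, n):
--     return [x * (i + 1) for i in range(n)]
-- ===== Notes on version B (the rewrite author's own statement) =====
-- stated objective: simpler
-- what changed: Replaces A's two-branch loop (a special case for x==0 and additive range-stepping otherwise) with a single comprehension computing each term by index multiplication.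
import Mathlib
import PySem

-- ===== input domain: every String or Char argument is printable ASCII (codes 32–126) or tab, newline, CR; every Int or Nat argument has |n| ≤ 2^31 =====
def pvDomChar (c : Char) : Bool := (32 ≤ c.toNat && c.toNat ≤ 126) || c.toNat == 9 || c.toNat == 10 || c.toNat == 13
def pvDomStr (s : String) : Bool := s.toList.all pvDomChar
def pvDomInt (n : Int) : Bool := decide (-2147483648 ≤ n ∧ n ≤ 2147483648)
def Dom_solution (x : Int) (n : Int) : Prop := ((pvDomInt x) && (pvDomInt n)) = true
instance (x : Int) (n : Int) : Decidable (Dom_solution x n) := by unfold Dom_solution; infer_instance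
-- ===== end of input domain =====

-- B replaces A's two-branch loop (x==0 special case + additive range-stepping) with one index-based comprehension; objective: simpler.


-- ===== PORT A =====
def solution (x : Int) (n : Int) : List Int :=
  let answer : List Int := []
  if x = 0 then
    -- for x in range(x, n): answer.append(0)   (x = 0 here)
    (PySem.List.pyRange x n 1).foldl (fun acc _ => acc ++ [(0 : Int)]) answer
  else
    -- for x in range(x, n*x + x, x): answer.append(x)
    (PySem.List.pyRange x (n * x + x) x).foldl (fun acc v => acc ++ [v]) answer

-- ===== PORT B =====
def solution_alt (x : Int) (n : Int) : List Int :=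
  (PySem.List.pyRange 0 n 1).map (fun i => x * (i + 1))

-- ===== PRECONDITION & SPEC =====
def Spec_solution (x : Int) (n : Int) (out : List Int) : Prop := out = solution_alt x n
instance (x : Int) (n : Int) (out : List Int) : Decidable (Spec_solution x n out) := by unfold Spec_solution; infer_instance

-- ===== CLAIM (what is proved, stated in full; the proofs are below) =====
def Claim_equal_solution : Prop := ∀ (x : Int) (n : Int), Dom_solution x n → Spec_solution x n (solution x n)

-- ===== LEMMAS AND PROOFS =====

-- appending f of each element, one by one, is init ++ map f
theorem foldl_append_map {α β : Type} (f : α → β) (l : List α) (init : List β) :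
    l.foldl (fun acc v => acc ++ [f v]) init = init ++ l.map f := by
  induction l generalizing init with
  | nil => simp
  | cons h t ih => simp [List.foldl, ih]

theorem pyRange_step_eq (x n : Int) (hx : x ≠ 0) :
    PySem.List.pyRange x (n * x + x) x = (List.range n.toNat).map (fun (k : Nat) => x * ((k : Int) + 1)) := by
  rcases lt_or_gt_of_ne hx with hneg | hpos
  · rw [PySem.List.pyRange_of_neg _ _ hneg]
    by_cases hn : 0 < n
    · have hcond : n * x + x < x := by nlinarith
      have hcount : ((x - (n * x + x) + -x - 1) / -x).toNat = n.toNat := by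
        have h1 : x - (n * x + x) + -x - 1 = (-x - 1) + n * (-x) := by ring
        have h2 : ((-x - 1) + n * (-x)) / (-x) = (-x - 1) / (-x) + n :=
          Int.add_mul_ediv_right _ _ (by omega)
        have h3 : (-x - 1) / (-x) = 0 := Int.ediv_eq_zero_of_lt (by omega) (by omega)
        rw [h1, h2, h3]; omega
      rw [if_pos hcond, hcount]
      apply List.map_congr_left
      intro k hk
      ring
    · have hcond : ¬ (n * x + x < x) := by nlinarith [mul_nonneg (by omega : (0:Int) ≤ -n) (by omega : (0:Int) ≤ -x)]
      rw [if_neg hcond]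
      have : n.toNat = 0 := by omega
      simp [this]
  · rw [PySem.List.pyRange_of_pos _ _ hpos]
    by_cases hn : 0 < n
    · have hcond : x < n * x + x := by nlinarith
      have hcount : ((n * x + x - x + x - 1) / x).toNat = n.toNat := by
        have h1 : n * x + x - x + x - 1 = (x - 1) + n * x := by ring
        have h2 : ((x - 1) + n * x) / x = (x - 1) / x + n :=
          Int.add_mul_ediv_right _ _ (by omega)
        have h3 : (x - 1) / x = 0 := Int.ediv_eq_zero_of_lt (by omega) (by omega)
        rw [h1, h2, h3]; omega
      rw [if_pos hcond, hcount]
      apply List.map_congr_left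
      intro k hk
      ring
    · have hcond : ¬ (x < n * x + x) := by nlinarith [mul_nonneg (by omega : (0:Int) ≤ -n) (le_of_lt hpos)]
      rw [if_neg hcond]
      have : n.toNat = 0 := by omega
      simp [this]

-- ===== VERDICT (by name: the statement is the Claim_ definition above) =====
theorem solution_spec : Claim_equal_solution := by
  intro x n _
  show solution x n = solution_alt x n
  unfold solution solution_alt
  by_cases hx : x = 0
  · subst hx
    rw [if_pos rfl]
    rw [show ((PySem.List.pyRange 0 n 1).foldl (fun acc _ => acc ++ [(0:Int)]) []) =
          (PySem.List.pyRange 0 n 1).foldl (fun acc v => acc ++ [(fun _ : Int => (0:Int)) v]) [] from rfl,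
        foldl_append_map, List.nil_append]
    apply List.map_congr_left
    intro k _
    ring
  · simp only [if_neg hx]
    rw [show ((PySem.List.pyRange x (n * x + x) x).foldl (fun acc v => acc ++ [v]) []) =
          (PySem.List.pyRange x (n * x + x) x).foldl (fun acc v => acc ++ [id v]) [] from rfl,
        foldl_append_map, pyRange_step_eq x n hx, PySem.List.pyRange_one,
        List.map_id, List.nil_append, List.map_map, Int.sub_zero]
    apply List.map_congr_left
    intro k _
    simp [Function.comp]
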